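-- pv_equiv track=rewrite | github.com/pypi-data/pypi-mirror-403 | packages/nanopy-dual/nanopy_dual-1.0.42.tar.gz/nanopy_dual-1.0.42/nanopy_dual/hashcat.py | calc_keyspace
-- ===== SOURCE A (Python) =====
-- def calc_keyspace(mask: str) -> int:
--     """
--     Calculate keyspace (number of combinations) for a mask.
--
--     ?l = 26, ?u = 26, ?d = 10, ?s = 33, ?a = 95
--     """
--     keyspace = 1
--     i = 0
--     while i < len(mask):
--         if mask[i] == '?':
--             if i + 1 < len(mask):
--                 c = mask[i + 1]
--                 if c == 'l':
--                     keyspace *= 26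
--                 elif c == 'u':
--                     keyspace *= 26
--                 elif c == 'd':
--                     keyspace *= 10
--                 elif c == 's':
--                     keyspace *= 33
--                 elif c == 'a':
--                     keyspace *= 95
--                 else:
--                     keyspace *= 95  # default
--                 i += 2
--             else:
--                 i += 1
--         else:
--             i += 1  # literal character
--     return keyspace
-- ===== SOURCE B (Python) =====
-- import re
-- import math
--
-- _MULT = {'l': 26, 'u': 26, 'd': 10, 's': 33, 'a': 95}
--
-- def calc_keyspace(mask: str) -> int:
--     tokens = re.findall(r'\?[\s\S]', mask)
--     return math.prod(_MULT.get(t[1], 95) for t in tokens)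
-- ===== Notes on version B (the rewrite author's own statement) =====
-- stated objective: faster
-- what changed: B replaces A's manual index-stepping while loop with fused multiplication by regex extraction of the mask tokens followed by a dict-lookup product via math.prod, separating token scanning from arithmetic.
import Mathlib
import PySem

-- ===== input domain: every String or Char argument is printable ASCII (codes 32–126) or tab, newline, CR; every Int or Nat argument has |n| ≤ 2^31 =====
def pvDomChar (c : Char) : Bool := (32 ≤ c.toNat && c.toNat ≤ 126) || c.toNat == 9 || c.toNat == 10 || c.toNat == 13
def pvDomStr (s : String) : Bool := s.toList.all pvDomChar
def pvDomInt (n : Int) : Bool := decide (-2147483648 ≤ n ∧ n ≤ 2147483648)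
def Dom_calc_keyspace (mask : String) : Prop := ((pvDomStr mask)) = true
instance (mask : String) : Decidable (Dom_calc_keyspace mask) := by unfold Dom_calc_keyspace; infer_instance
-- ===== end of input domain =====

-- B extracts the '?x' tokens first (regex in Python) and multiplies their table values; same O(n), idiomatic decomposition.


-- ===== PORT A =====
-- A's if/elif chain on the char after '?'
def pvMultA (c : Char) : Int :=
  if c = 'l' then 26
  else if c = 'u' then 26
  else if c = 'd' then 10
  else if c = 's' then 33
  else if c = 'a' then 95
  else 95
-- A's while loop: at '?' with a following char, multiply and advance 2; otherwise advance 1.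
def pvLoopA : List Char → Int → Int
  | [], k => k
  | '?' :: c :: rest, k => pvLoopA rest (k * pvMultA c)
  | _ :: rest, k => pvLoopA rest k

def calc_keyspace (mask : String) : Int := pvLoopA mask.toList 1

-- ===== PORT B =====
-- hand port of re.findall(r'\?[\s\S]', mask): greedy left-to-right non-overlapping
-- two-char matches starting with '?'; we keep the second char of each match.
def pvTokensB : List Char → List Char
  | [] => []
  | '?' :: c :: rest => c :: pvTokensB rest
  | _ :: rest => pvTokensB rest
-- _MULT.get(c, 95)
def pvMultB (c : Char) : Int :=
  (PySem.Dict.ofList [('l', (26 : Int)), ('u', 26), ('d', 10), ('s', 33), ('a', 95)]).getD c 95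

-- math.prod over the mapped multipliers
def calc_keyspace_alt (mask : String) : Int :=
  ((pvTokensB mask.toList).map pvMultB).foldl (· * ·) 1

-- ===== PRECONDITION & SPEC =====
def Spec_calc_keyspace (mask : String) (out : Int) : Prop := out = calc_keyspace_alt mask
instance (mask : String) (out : Int) : Decidable (Spec_calc_keyspace mask out) := by unfold Spec_calc_keyspace; infer_instance

-- ===== CLAIM (what is proved, stated in full; the proofs are below) =====
def Claim_equal_calc_keyspace : Prop := ∀ (mask : String), Dom_calc_keyspace mask → Spec_calc_keyspace mask (calc_keyspace mask)

-- ===== LEMMAS AND PROOFS =====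

theorem pvMult_eq (c : Char) : pvMultA c = pvMultB c := by
  have hd : PySem.Dict.ofList [('l', (26 : Int)), ('u', 26), ('d', 10), ('s', 33), ('a', 95)]
      = PySem.Dict.mk [('l', 26), ('u', 26), ('d', 10), ('s', 33), ('a', 95)] := by decide
  by_cases h1 : c = 'l' <;> by_cases h2 : c = 'u' <;> by_cases h3 : c = 'd' <;>
    by_cases h4 : c = 's' <;> by_cases h5 : c = 'a' <;>
    simp [pvMultA, pvMultB, hd, PySem.Dict.getD, PySem.Dict.get?,
      h1, h2, h3, h4, h5, Ne.symm]

theorem foldl_mul_shift (l : List Int) (k : Int) :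
    l.foldl (· * ·) k = k * l.foldl (· * ·) 1 := by
  induction l generalizing k with
  | nil => simp
  | cons x t ih =>
    simp only [List.foldl_cons]
    rw [ih (k * x), ih (1 * x)]
    ring

theorem loopA_eq (l : List Char) (k : Int) :
    pvLoopA l k = k * ((pvTokensB l).map pvMultB).foldl (· * ·) 1 := by
  fun_induction pvLoopA l k with
  | case1 k => simp [pvTokensB]
  | case2 c rest k ih =>
    simp only [pvTokensB, List.map_cons, List.foldl_cons, ih]
    rw [foldl_mul_shift _ (1 * pvMultB c), pvMult_eq]
    ring
  | case3 head rest k _ ih =>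
    have ht : pvTokensB (head :: rest) = pvTokensB rest := by
      cases rest with
      | nil => simp only [pvTokensB]
      | cons b t => simp [pvTokensB]
    rw [ht]; exact ih

-- ===== VERDICT (by name: the statement is the Claim_ definition above) =====
theorem calc_keyspace_spec : Claim_equal_calc_keyspace := by
  intro mask _
  unfold Spec_calc_keyspace calc_keyspace calc_keyspace_alt
  rw [loopA_eq]; ring
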